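-- pv_equiv track=rewrite | github.com/sorgerlab/indra | indra/sources/trips/analyze_ekbs.py | type_match
-- ===== SOURCE A (Python) =====
-- def type_match(a, b):
--     # If the types are the same, return True
--     if a['type'] == b['type']:
--         return True
--     # Otherwise, look at some special cases
--     eq_groups = [
--         {'ONT::GENE-PROTEIN', 'ONT::GENE', 'ONT::PROTEIN'},
--         {'ONT::PHARMACOLOGIC-SUBSTANCE', 'ONT::CHEMICAL'}
--         ]
--     for eq_group in eq_groups:
--         if a['type'] in eq_group and b['type'] in eq_group:
--             return True
--     return False
-- ===== SOURCE B (Python) =====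
-- # B: normalize each type to a canonical group representative once, then compare;
-- # the explicit list of sets and the membership loop are gone.
-- _CANON = {
--     'ONT::GENE-PROTEIN': 'ONT::GENE-PROTEIN',
--     'ONT::GENE': 'ONT::GENE-PROTEIN',
--     'ONT::PROTEIN': 'ONT::GENE-PROTEIN',
--     'ONT::PHARMACOLOGIC-SUBSTANCE': 'ONT::PHARMACOLOGIC-SUBSTANCE',
--     'ONT::CHEMICAL': 'ONT::PHARMACOLOGIC-SUBSTANCE',
-- }
--
-- def type_match(a, b):
--     ta = a['type']
--     tb = b['type']
--     return _CANON.get(ta, ta) == _CANON.get(tb, tb)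
-- ===== Notes on version B (the rewrite author's own statement) =====
-- stated objective: simpler
-- what changed: Replaced the equality check plus a loop over a list of equivalence sets with two membership tests each by a single normalize-then-compare: a canonical-representative dict maps each special type to its group representative (unlisted types map to themselves) and the function is one comparison.
import Mathlib
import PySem

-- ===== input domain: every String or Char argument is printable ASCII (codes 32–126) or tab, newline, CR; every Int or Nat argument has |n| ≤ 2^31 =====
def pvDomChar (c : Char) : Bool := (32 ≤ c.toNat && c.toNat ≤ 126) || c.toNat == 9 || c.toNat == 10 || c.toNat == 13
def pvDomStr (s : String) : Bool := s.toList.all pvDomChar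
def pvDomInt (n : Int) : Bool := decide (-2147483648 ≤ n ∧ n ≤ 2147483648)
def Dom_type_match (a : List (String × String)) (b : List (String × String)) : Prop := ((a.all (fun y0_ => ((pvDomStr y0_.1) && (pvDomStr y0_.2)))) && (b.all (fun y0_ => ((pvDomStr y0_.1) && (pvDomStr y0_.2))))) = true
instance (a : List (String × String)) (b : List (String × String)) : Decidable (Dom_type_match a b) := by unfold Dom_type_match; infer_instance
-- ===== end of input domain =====

-- B normalizes each type to a canonical group representative and compares once; A's
-- explicit list of equivalence sets and the membership loop are gone.

-- ===== PORT A =====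
-- the two equivalence groups, as Python sets
def tmEqGroups : List (PySem.Set String) :=
  [PySem.Set.ofList ["ONT::GENE-PROTEIN", "ONT::GENE", "ONT::PROTEIN"],
   PySem.Set.ofList ["ONT::PHARMACOLOGIC-SUBSTANCE", "ONT::CHEMICAL"]]

def type_match (a : List (String × String)) (b : List (String × String)) : Bool :=
  match a.find? (fun kv => kv.1 == "type"), b.find? (fun kv => kv.1 == "type") with
  | some ta, some tb =>
      if ta.2 == tb.2 then true
      else
        -- for eq_group in eq_groups: if a['type'] in eq_group and b['type'] in eq_group: return True
        tmEqGroups.foldl (fun r g => r || (PySem.Set.contains g ta.2 && PySem.Set.contains g tb.2)) false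
  | _, _ => false  -- KeyError: excluded by Pre_type_match

-- ===== PORT B =====
def tmCanon : PySem.Dict String String := PySem.Dict.mk  -- literal dict (distinct keys)
  [("ONT::GENE-PROTEIN", "ONT::GENE-PROTEIN"),
   ("ONT::GENE", "ONT::GENE-PROTEIN"),
   ("ONT::PROTEIN", "ONT::GENE-PROTEIN"),
   ("ONT::PHARMACOLOGIC-SUBSTANCE", "ONT::PHARMACOLOGIC-SUBSTANCE"),
   ("ONT::CHEMICAL", "ONT::PHARMACOLOGIC-SUBSTANCE")]

def type_match_alt (a : List (String × String)) (b : List (String × String)) : Bool :=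
  match a.find? (fun kv => kv.1 == "type") with
  | none => false  -- KeyError: excluded by Pre_type_match
  | some ta =>
    match b.find? (fun kv => kv.1 == "type") with
    | none => false  -- KeyError: excluded by Pre_type_match
    | some tb => tmCanon.getD ta.2 ta.2 == tmCanon.getD tb.2 tb.2

-- ===== PRECONDITION & SPEC =====
-- Pre_ excludes inputs with no 'type' key, on which Python A raises KeyError.
def Pre_type_match (a : List (String × String)) (b : List (String × String)) : Prop :=
  a.any (fun kv => kv.1 == "type") = true ∧ b.any (fun kv => kv.1 == "type") = true
instance (a : List (String × String)) (b : List (String × String)) : Decidable (Pre_type_match a b) := by unfold Pre_type_match; infer_instance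

def pvWitness_type_match : (List (String × String)) × (List (String × String)) :=
  ([("type", "ONT::GENE")], [("type", "ONT::PROTEIN")])

def Spec_type_match (a : List (String × String)) (b : List (String × String)) (out : Bool) : Prop := out = type_match_alt a b
instance (a : List (String × String)) (b : List (String × String)) (out : Bool) : Decidable (Spec_type_match a b out) := by unfold Spec_type_match; infer_instance

-- ===== CLAIM (what is proved, stated in full; the proofs are below) =====
def Claim_equal_type_match : Prop := ∀ (a : List (String × String)) (b : List (String × String)), Dom_type_match a b → Pre_type_match a b → Spec_type_match a b (type_match a b)

-- ===== LEMMAS AND PROOFS =====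

-- the pointwise fact: A's group scan equals B's normalize-then-compare, for any two type strings
lemma tm_core (ta tb : String) :
    (if ta == tb then true
     else tmEqGroups.foldl (fun r g => r || (PySem.Set.contains g ta && PySem.Set.contains g tb)) false)
    = (tmCanon.getD ta ta == tmCanon.getD tb tb) := by
  by_cases hta : ta ∈ (["ONT::GENE-PROTEIN", "ONT::GENE", "ONT::PROTEIN", "ONT::PHARMACOLOGIC-SUBSTANCE", "ONT::CHEMICAL"] : List String) <;>
  by_cases htb : tb ∈ (["ONT::GENE-PROTEIN", "ONT::GENE", "ONT::PROTEIN", "ONT::PHARMACOLOGIC-SUBSTANCE", "ONT::CHEMICAL"] : List String) <;>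
  simp only [List.mem_cons, List.not_mem_nil, or_false, not_or] at hta htb
  · rcases hta with h | h | h | h | h <;> rcases htb with h' | h' | h' | h' | h' <;> subst h h' <;> decide
  · obtain ⟨n1, n2, n3, n4, n5⟩ := htb
    rcases hta with h | h | h | h | h <;> subst h <;>
      simp [tmEqGroups, tmCanon, PySem.Set.contains, PySem.Set.ofList, PySem.Dict.getD,
            PySem.Dict.get?, List.foldl, beq_iff_eq,
            n1, n2, n3, n4, n5, Ne.symm n1, Ne.symm n2, Ne.symm n3, Ne.symm n4, Ne.symm n5]
  · obtain ⟨n1, n2, n3, n4, n5⟩ := hta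
    rcases htb with h | h | h | h | h <;> subst h <;>
      simp [tmEqGroups, tmCanon, PySem.Set.contains, PySem.Set.ofList, PySem.Dict.getD,
            PySem.Dict.get?, List.foldl, beq_iff_eq,
            n1, n2, n3, n4, n5, Ne.symm n1, Ne.symm n2, Ne.symm n3, Ne.symm n4, Ne.symm n5]
  · obtain ⟨m1, m2, m3, m4, m5⟩ := hta
    obtain ⟨n1, n2, n3, n4, n5⟩ := htb
    simp [tmEqGroups, tmCanon, PySem.Set.contains, PySem.Set.ofList, PySem.Dict.getD,
          PySem.Dict.get?, List.foldl, beq_iff_eq,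
          m1, m2, m3, m4, m5, n1, n2, n3, n4, n5,
          Ne.symm m1, Ne.symm m2, Ne.symm m3, Ne.symm m4, Ne.symm m5,
          Ne.symm n1, Ne.symm n2, Ne.symm n3, Ne.symm n4, Ne.symm n5]
    exact Eq.symm (Bool.beq_eq_decide_eq ta tb)

-- ===== VERDICT (by name: the statement is the Claim_ definition above) =====
theorem type_match_spec : Claim_equal_type_match := by
  intro a b _ hpre
  obtain ⟨ha, hb⟩ := hpre
  unfold Spec_type_match type_match type_match_alt
  obtain ⟨ka, hka⟩ := Option.isSome_iff_exists.mp ((List.find?_isSome).mpr (List.any_eq_true.mp ha |>.imp (fun _ h => ⟨h.1, h.2⟩)))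
  obtain ⟨kb, hkb⟩ := Option.isSome_iff_exists.mp ((List.find?_isSome).mpr (List.any_eq_true.mp hb |>.imp (fun _ h => ⟨h.1, h.2⟩)))
  rw [hka, hkb]
  exact tm_core ka.2 kb.2
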